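-- pv_equiv track=rewrite | github.com/Chashchin-Dmitry/pocketcoder-a1 | a1/dashboard.py | _classify_line
-- ===== SOURCE A (Python) =====
-- def _classify_line(line: str) -> str:
--     """Classify a Claude output line into a tool type for icon display"""
--     lower = line.lower().strip()
--     if any(kw in lower for kw in ["read(", "reading file", "read file", "reading ", "read "]):
--         return "read"
--     elif any(kw in lower for kw in ["edit(", "editing file", "edit file", "editing "]):
--         return "edit"
--     elif any(kw in lower for kw in ["write(", "writing file", "write file", "creating file", "created "]):
--         return "write"
--     elif any(kw in lower for kw in ["bash(", "running:", "$ ", "command", "terminal", "pytest", "ruff "]):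
--         return "bash"
--     elif any(kw in lower for kw in ["let me", "i'll", "i need", "thinking", "analyzing", "looking"]):
--         return "thinking"
--     return "text"
-- ===== SOURCE B (Python) =====
-- _CATS = ["read", "edit", "write", "bash", "thinking", "text"]
-- _KEYWORDS = [
--     ("read(", 0), ("reading file", 0), ("read file", 0), ("reading ", 0), ("read ", 0),
--     ("edit(", 1), ("editing file", 1), ("edit file", 1), ("editing ", 1),
--     ("write(", 2), ("writing file", 2), ("write file", 2), ("creating file", 2), ("created ", 2),
--     ("bash(", 3), ("running:", 3), ("$ ", 3), ("command", 3), ("terminal", 3), ("pytest", 3), ("ruff ", 3),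
--     ("let me", 4), ("i'll", 4), ("i need", 4), ("thinking", 4), ("analyzing", 4), ("looking", 4),
-- ]
--
-- def _classify_line(line: str) -> str:
--     lower = line.lower().strip()
--     best = 5
--     for kw, i in _KEYWORDS:
--         if i < best and kw in lower:
--             best = i
--     return _CATS[best]
-- ===== Notes on version B (the rewrite author's own statement) =====
-- stated objective: alternative
-- what changed: Replaces the per-category early-return any() cascade by a single exhaustive pass over a flat (keyword, priority) table that maintains a minimum-priority accumulator, then indexes the category table once.
import Mathlib
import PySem

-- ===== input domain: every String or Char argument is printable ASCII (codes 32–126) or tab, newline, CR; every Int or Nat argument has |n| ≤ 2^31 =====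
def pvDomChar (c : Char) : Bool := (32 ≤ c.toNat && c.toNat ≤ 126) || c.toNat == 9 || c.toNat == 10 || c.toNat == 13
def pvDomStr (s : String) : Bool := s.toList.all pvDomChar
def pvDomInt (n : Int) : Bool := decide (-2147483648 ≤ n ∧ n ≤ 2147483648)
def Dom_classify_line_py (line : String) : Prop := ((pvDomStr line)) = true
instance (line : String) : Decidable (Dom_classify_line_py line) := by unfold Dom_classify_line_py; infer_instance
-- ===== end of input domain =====

-- B replaces A's per-category early-return any() cascade with one exhaustive pass over a flat
-- (keyword, priority) table keeping a minimum-priority accumulator, then a single table lookup.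

-- ===== PORT A =====
def classify_line_py (line : String) : String :=
  let lower := PySem.Str.strip (PySem.Str.lower line)
  if ["read(", "reading file", "read file", "reading ", "read "].any
      (fun kw => PySem.Str.isIn kw lower) then "read"
  else if ["edit(", "editing file", "edit file", "editing "].any
      (fun kw => PySem.Str.isIn kw lower) then "edit"
  else if ["write(", "writing file", "write file", "creating file", "created "].any
      (fun kw => PySem.Str.isIn kw lower) then "write"
  else if ["bash(", "running:", "$ ", "command", "terminal", "pytest", "ruff "].any
      (fun kw => PySem.Str.isIn kw lower) then "bash"
  else if ["let me", "i'll", "i need", "thinking", "analyzing", "looking"].any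
      (fun kw => PySem.Str.isIn kw lower) then "thinking"
  else "text"

-- ===== PORT B =====
def pvCats : List String := ["read", "edit", "write", "bash", "thinking", "text"]

def pvKeywords : List (String × Nat) :=
  [("read(", 0), ("reading file", 0), ("read file", 0), ("reading ", 0), ("read ", 0),
   ("edit(", 1), ("editing file", 1), ("edit file", 1), ("editing ", 1),
   ("write(", 2), ("writing file", 2), ("write file", 2), ("creating file", 2), ("created ", 2),
   ("bash(", 3), ("running:", 3), ("$ ", 3), ("command", 3), ("terminal", 3), ("pytest", 3), ("ruff ", 3),
   ("let me", 4), ("i'll", 4), ("i need", 4), ("thinking", 4), ("analyzing", 4), ("looking", 4)]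

def classify_line_py_alt (line : String) : String :=
  let lower := PySem.Str.strip (PySem.Str.lower line)
  let best := pvKeywords.foldl
    (fun b p => if p.2 < b && PySem.Str.isIn p.1 lower then p.2 else b) 5
  pvCats.getD best "text"

-- ===== PRECONDITION & SPEC =====
def Spec_classify_line_py (line : String) (out : String) : Prop := out = classify_line_py_alt line
instance (line : String) (out : String) : Decidable (Spec_classify_line_py line out) := by unfold Spec_classify_line_py; infer_instance

-- ===== CLAIM =====
def Claim_equal_classify_line_py : Prop := ∀ (line : String), Dom_classify_line_py line → Spec_classify_line_py line (classify_line_py line)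

-- ===== LEMMAS AND PROOFS =====

-- folding one priority group: the accumulator drops to i iff i < b and some keyword of the group matches
lemma pv_fold_group (f : String → Bool) (kws : List String) (i b : Nat) :
    (kws.map (fun kw => (kw, i))).foldl
      (fun b p => if p.2 < b && f p.1 then p.2 else b) b
    = if i < b && kws.any f then i else b := by
  induction kws generalizing b with
  | nil => simp
  | cons kw rest ih =>
    simp only [List.map_cons, List.foldl_cons, List.any_cons]
    rw [ih]
    by_cases hk : f kw = true
    · by_cases hb : i < b
      · simp [hk, hb]
      · simp [hk, hb]
    · rw [Bool.not_eq_true] at hk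
      simp [hk]

theorem classify_line_py_spec : Claim_equal_classify_line_py := by
  intro line _
  unfold Spec_classify_line_py classify_line_py classify_line_py_alt
  have hsplit : pvKeywords =
      (["read(", "reading file", "read file", "reading ", "read "].map (fun kw => (kw, 0)))
      ++ (["edit(", "editing file", "edit file", "editing "].map (fun kw => (kw, 1)))
      ++ (["write(", "writing file", "write file", "creating file", "created "].map (fun kw => (kw, 2)))
      ++ (["bash(", "running:", "$ ", "command", "terminal", "pytest", "ruff "].map (fun kw => (kw, 3)))
      ++ (["let me", "i'll", "i need", "thinking", "analyzing", "looking"].map (fun kw => (kw, 4))) := rfl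
  set lower := PySem.Str.strip (PySem.Str.lower line) with hl
  simp only [hsplit, List.foldl_append, pv_fold_group (fun kw => PySem.Str.isIn kw lower)]
  set a1 := ["read(", "reading file", "read file", "reading ", "read "].any (fun kw => PySem.Str.isIn kw lower) with h1
  set a2 := ["edit(", "editing file", "edit file", "editing "].any (fun kw => PySem.Str.isIn kw lower) with h2
  set a3 := ["write(", "writing file", "write file", "creating file", "created "].any (fun kw => PySem.Str.isIn kw lower) with h3
  set a4 := ["bash(", "running:", "$ ", "command", "terminal", "pytest", "ruff "].any (fun kw => PySem.Str.isIn kw lower) with h4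
  set a5 := ["let me", "i'll", "i need", "thinking", "analyzing", "looking"].any (fun kw => PySem.Str.isIn kw lower) with h5
  cases a1 <;> cases a2 <;> cases a3 <;> cases a4 <;> cases a5 <;> rfl
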